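-- pv_equiv track=rewrite | github.com/miiwo/advent-of-code-2022 | day3/day3.py | findSharedItemInNGroup
-- ===== SOURCE A (Python) =====
-- def findPriority(item:chr):
--     if ord(item) >= 97:
--         return ord(item) - 96
--     else:
--         return ord(item) - 38
--
-- def findSharedItemInNGroup(group) -> int:
--     didAppear = [0] * 52
--
--     for index, member in enumerate(group[:-1]):
--         for item in member:
--             priority = findPriority(item)
--             didAppear[priority - 1] = index + 1 if didAppear[priority - 1] == index else didAppear[priority - 1]
--
--     for item in group[-1]:
--         priority = findPriority(item)
--         if didAppear[priority - 1] == len(group) - 1: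
--             return priority
--
--     return 0
-- ===== SOURCE B (Python) =====
-- def findPriority(item):
--     if ord(item) >= 97:
--         return ord(item) - 96
--     else:
--         return ord(item) - 38
--
-- def findSharedItemInNGroup(group) -> int:
--     common = None
--     for member in group[:-1]:
--         s = {findPriority(c) for c in member}
--         common = s if common is None else common & s
--     for item in group[-1]:
--         priority = findPriority(item)
--         if common is None or priority in common:
--             return priority
--     return 0
-- ===== Notes on version B (the rewrite author's own statement) =====
-- stated objective: idiomatic
-- what changed: Replaces the 52-slot sequential run-counter array (advance a slot's counter when it equals the member index, then compare against len(group)-1) with per-member priority sets intersected across the first N-1 members, then a first-match scan of the last member.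
-- outside the precondition, e.g. on findSharedItemInNGroup(['Y', '%']): A returns -1, B returns 0; on findSharedItemInNGroup(['a[', 'a']): A raises IndexError, B returns 1; on findSharedItemInNGroup([]): A raises IndexError, B raises IndexError
import Mathlib
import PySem

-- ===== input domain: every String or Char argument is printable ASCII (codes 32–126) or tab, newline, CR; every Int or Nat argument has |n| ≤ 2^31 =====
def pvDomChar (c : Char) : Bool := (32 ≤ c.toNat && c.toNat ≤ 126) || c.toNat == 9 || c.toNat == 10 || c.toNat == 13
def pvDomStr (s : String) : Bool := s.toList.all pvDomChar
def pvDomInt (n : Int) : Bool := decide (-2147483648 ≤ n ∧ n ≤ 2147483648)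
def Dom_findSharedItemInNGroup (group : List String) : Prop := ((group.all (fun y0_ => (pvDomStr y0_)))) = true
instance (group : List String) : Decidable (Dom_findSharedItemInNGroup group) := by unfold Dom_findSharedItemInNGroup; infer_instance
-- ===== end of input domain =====

-- B replaces A's 52-slot sequential run-counter table with per-member priority sets
-- intersected across the first N-1 members (objective: more idiomatic, same cost).


-- ===== PORT A =====
def findPriority (item : Char) : Int :=
  if 97 ≤ (item.toNat : Int) then (item.toNat : Int) - 96 else (item.toNat : Int) - 38

-- inner 'for item in member' loop of A; pyGetD/pySetD are exact (including Python's
-- negative-index wraparound) for the in-range indices Pre_ guarantees (Python raises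
-- IndexError outside, excluded by Pre_)
def pvStepA (da : List Int) (index : Int) (member : List Char) : List Int :=
  member.foldl (fun da item =>
    let priority := findPriority item
    let cur := PySem.List.pyGetD da (priority - 1) 0
    PySem.List.pySetD da (priority - 1) (if cur = index then index + 1 else cur)) da

-- final 'for item in group[-1]' loop of A: first priority whose slot equals len(group)-1, else 0
def pvScanA (da : List Int) (n1 : Int) : List Char → Int
  | [] => 0
  | c :: rest =>
    let priority := findPriority c
    if PySem.List.pyGetD da (priority - 1) 0 = n1 then priority else pvScanA da n1 rest

def findSharedItemInNGroup (group : List String) : Int :=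
  let didAppear := List.replicate 52 (0 : Int)
  let da := (PySem.List.enumerate (PySem.List.slice group none (some (-1))) 0).foldl
      (fun da im => pvStepA da im.1 im.2.toList) didAppear
  pvScanA da ((group.length : Int) - 1) ((PySem.List.pyGetD group (-1) "").toList)

-- ===== PORT B =====
def pvPriB (item : Char) : Int :=
  if 97 ≤ (item.toNat : Int) then (item.toNat : Int) - 96 else (item.toNat : Int) - 38

-- final loop of B: first priority that is in 'common' (or any, if common is None), else 0
def pvScanB (common : Option (PySem.Set Int)) : List Char → Int
  | [] => 0
  | c :: rest =>
    let priority := pvPriB c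
    if (match common with
        | none => true
        | some s => PySem.Set.contains s priority) then priority else pvScanB common rest

def findSharedItemInNGroup_alt (group : List String) : Int :=
  let common : Option (PySem.Set Int) :=
    (PySem.List.slice group none (some (-1))).foldl
      (fun common member =>
        some (match common with
              | none => PySem.Set.ofList (member.toList.map pvPriB)
              | some c => PySem.Set.inter c (PySem.Set.ofList (member.toList.map pvPriB))))
      none
  pvScanB common ((PySem.List.pyGetD group (-1) "").toList)

-- ===== PRECONDITION & SPEC =====
-- the item priority and the (possibly negatively wrapped) 52-slot table index a
-- character occupies in A's table; spelled out so Pre_ depends on neither port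
def pvPri (c : Char) : Int :=
  if 97 ≤ (c.toNat : Int) then (c.toNat : Int) - 96 else (c.toNat : Int) - 38

def pvOkChar (c : Char) : Bool := !(91 ≤ c.toNat && c.toNat ≤ 96)

def pvChars (group : List String) : List Char := group.flatMap String.toList

-- Pre_ excludes the empty list and strings with characters '['…'`' (A raises IndexError
-- on both), and the rare groups where two characters of different priority collide on
-- the same wrapped slot of A's 52-slot table (e.g. '%' with 'Y'): there the shared-item
-- notion is ambiguous and A's and B's (both arbitrary) answers can disagree.
def Pre_findSharedItemInNGroup (group : List String) : Prop :=
  group ≠ [] ∧ (group.all (fun s => s.toList.all pvOkChar)) = true ∧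
  ((pvChars group).all (fun c => (1 ≤ pvPri c) ||
     !((pvChars group).any (fun c' => pvPri c' == pvPri c + 52)))) = true

instance (group : List String) : Decidable (Pre_findSharedItemInNGroup group) := by
  unfold Pre_findSharedItemInNGroup; infer_instance

def pvWitness_findSharedItemInNGroup : List String := ["ab", "cb", "b"]

def Spec_findSharedItemInNGroup (group : List String) (out : Int) : Prop := out = findSharedItemInNGroup_alt group
instance (group : List String) (out : Int) : Decidable (Spec_findSharedItemInNGroup group out) := by unfold Spec_findSharedItemInNGroup; infer_instance

-- ===== CLAIM (what is proved, stated in full; the proofs are below) =====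
def Claim_equal_findSharedItemInNGroup : Prop := ∀ (group : List String), Dom_findSharedItemInNGroup group → Pre_findSharedItemInNGroup group → Spec_findSharedItemInNGroup group (findSharedItemInNGroup group)

-- ===== LEMMAS AND PROOFS =====

-- the (possibly negatively wrapped) 52-slot table index a character occupies in A's table
def pvSlotC (c : Char) : Int := if pvPri c - 1 < 0 then pvPri c + 51 else pvPri c - 1

-- length of the leading run of members all containing table slot s (A's counter semantics)
def pvRun (s : Int) : List String → Int
  | [] => 0
  | m :: ms => if s ∈ m.toList.map pvSlotC then 1 + pvRun s ms else 0

lemma pvPriB_eq (c : Char) : pvPriB c = findPriority c := rfl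

lemma pvPri_eq (c : Char) : pvPri c = findPriority c := rfl

lemma pvSlotC_congr (c1 c2 : Char) (h : pvPri c1 = pvPri c2) : pvSlotC c1 = pvSlotC c2 := by
  simp [pvSlotC, h]

lemma slot_bounds (c : Char) (hd : pvDomChar c = true) (hok : pvOkChar c = true) :
    0 ≤ pvSlotC c ∧ pvSlotC c < 52 ∧ -52 ≤ findPriority c - 1 ∧ findPriority c - 1 < 52 := by
  simp [pvDomChar, pvOkChar] at hd hok
  rw [← pvPri_eq]
  unfold pvSlotC pvPri
  split_ifs <;> omega

lemma pyIdx_wrap (n : Nat) (i : Int) (h1 : -(n : Int) ≤ i) (h2 : i < 0) :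
    PySem.List.pyIdx? n i = PySem.List.pyIdx? n (i + n) := by
  unfold PySem.List.pyIdx?
  split_ifs <;> first | rfl | omega | (congr 1; omega)

lemma getD_wrap (da : List Int) (i : Int) (h1 : -(da.length : Int) ≤ i) (h2 : i < 0) :
    PySem.List.pyGetD da i 0 = PySem.List.pyGetD da (i + da.length) 0 := by
  unfold PySem.List.pyGetD PySem.List.pyGet?
  rw [pyIdx_wrap da.length i h1 h2]

lemma setD_wrap (da : List Int) (i : Int) (v : Int) (h1 : -(da.length : Int) ≤ i) (h2 : i < 0) :
    PySem.List.pySetD da i v = PySem.List.pySetD da (i + da.length) v := by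
  unfold PySem.List.pySetD PySem.List.pySet?
  rw [pyIdx_wrap da.length i h1 h2]

-- A's read at index (priority - 1), with Python's wraparound, is the read at the slot
lemma read_slot (da : List Int) (hlen : da.length = 52) (c : Char)
    (hd : pvDomChar c = true) (hok : pvOkChar c = true) :
    PySem.List.pyGetD da (findPriority c - 1) 0 = PySem.List.pyGetD da (pvSlotC c) 0 := by
  obtain ⟨b1, b2, b3, b4⟩ := slot_bounds c hd hok
  by_cases h : findPriority c - 1 < 0
  · rw [getD_wrap da (findPriority c - 1) (by omega) h]
    have : pvSlotC c = findPriority c - 1 + (da.length : Int) := by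
      rw [← pvPri_eq] at *
      unfold pvSlotC
      rw [if_pos (by omega)]
      omega
    rw [this]
  · have : pvSlotC c = findPriority c - 1 := by
      rw [← pvPri_eq] at *
      unfold pvSlotC
      rw [if_neg (by omega)]
    rw [this]

lemma write_slot (da : List Int) (hlen : da.length = 52) (c : Char) (v : Int)
    (hd : pvDomChar c = true) (hok : pvOkChar c = true) :
    PySem.List.pySetD da (findPriority c - 1) v = PySem.List.pySetD da (pvSlotC c) v := by
  obtain ⟨b1, b2, b3, b4⟩ := slot_bounds c hd hok
  by_cases h : findPriority c - 1 < 0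
  · rw [setD_wrap da (findPriority c - 1) v (by omega) h]
    have : pvSlotC c = findPriority c - 1 + (da.length : Int) := by
      rw [← pvPri_eq] at *
      unfold pvSlotC
      rw [if_pos (by omega)]
      omega
    rw [this]
  · have : pvSlotC c = findPriority c - 1 := by
      rw [← pvPri_eq] at *
      unfold pvSlotC
      rw [if_neg (by omega)]
    rw [this]

lemma getD_setD (da : List Int) (i j v : Int) (hi0 : 0 ≤ i) (hil : i < (da.length : Int))
    (hj0 : 0 ≤ j) (hjl : j < (da.length : Int)) :
    PySem.List.pyGetD (PySem.List.pySetD da i v) j 0 =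
      if j = i then v else PySem.List.pyGetD da j 0 := by
  rw [PySem.List.pySetD_of_nonneg da v hi0,
      PySem.List.pyGetD_eq_getElem _ _ hj0 (by simpa using hjl),
      PySem.List.pyGetD_eq_getElem _ _ hj0 hjl,
      List.getElem_set]
  split_ifs with h1 h2 h2 <;> first | rfl | omega

lemma stepA_get (member : List Char) : ∀ (da : List Int) (index : Int),
    da.length = 52 → (∀ c ∈ member, pvDomChar c = true ∧ pvOkChar c = true) →
    (pvStepA da index member).length = 52 ∧
    ∀ s : Int, 0 ≤ s → s < 52 →
      PySem.List.pyGetD (pvStepA da index member) s 0 =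
        if s ∈ member.map pvSlotC ∧ PySem.List.pyGetD da s 0 = index
        then index + 1 else PySem.List.pyGetD da s 0 := by
  induction member with
  | nil => intro da index hlen _; exact ⟨hlen, by intro s _ _; simp [pvStepA]⟩
  | cons c rest ih =>
    intro da index hlen hall
    have hc := hall c (by simp)
    obtain ⟨b1, b2, b3, b4⟩ := slot_bounds c hc.1 hc.2
    have hstep : pvStepA da index (c :: rest) =
        pvStepA (PySem.List.pySetD da (findPriority c - 1)
          (if PySem.List.pyGetD da (findPriority c - 1) 0 = index then index + 1
           else PySem.List.pyGetD da (findPriority c - 1) 0)) index rest := rfl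
    rw [read_slot da hlen c hc.1 hc.2] at hstep
    rw [write_slot da hlen c _ hc.1 hc.2] at hstep
    set v := (if PySem.List.pyGetD da (pvSlotC c) 0 = index then index + 1
           else PySem.List.pyGetD da (pvSlotC c) 0) with hv
    set da1 := PySem.List.pySetD da (pvSlotC c) v with hda1
    have hlen1 : da1.length = 52 := by
      rw [hda1, PySem.List.length_pySetD, hlen]
    have hget1 : ∀ s : Int, 0 ≤ s → s < 52 →
        PySem.List.pyGetD da1 s 0 =
          if s = pvSlotC c then v else PySem.List.pyGetD da s 0 := by
      intro s hs1 hs2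
      rw [hda1, getD_setD da (pvSlotC c) s v (by omega)
            (by simp only [hlen]; omega) (by omega) (by simp only [hlen]; omega)]
    obtain ⟨hlen2, hget2⟩ := ih da1 index hlen1 (fun x hx => hall x (by simp [hx]))
    refine ⟨by rwa [hstep], ?_⟩
    intro s hs1 hs2
    rw [hstep, hget2 s hs1 hs2, hget1 s hs1 hs2]
    by_cases hpq : s = pvSlotC c
    · rw [hpq]
      simp only [List.map_cons, List.mem_cons, if_true, true_or, true_and]
      by_cases hw : PySem.List.pyGetD da (pvSlotC c) 0 = index
      · rw [if_pos hw] at hv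
        have hcnd : ¬ (pvSlotC c ∈ List.map pvSlotC rest ∧ v = index) :=
          fun h => by have := h.2; omega
        rw [if_neg hcnd, if_pos hw]
        exact hv
      · rw [if_neg hw] at hv
        have hcnd : ¬ (pvSlotC c ∈ List.map pvSlotC rest ∧ v = index) :=
          fun h => hw (by rw [← hv]; exact h.2)
        rw [if_neg hcnd, if_neg hw]
        exact hv
    · rw [if_neg hpq]
      simp only [List.map_cons, List.mem_cons]
      by_cases h1 : s ∈ List.map pvSlotC rest ∧ PySem.List.pyGetD da s 0 = index
      · rw [if_pos h1, if_pos ⟨Or.inr h1.1, h1.2⟩]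
      · rw [if_neg h1, if_neg (by
          rintro ⟨h2, h3⟩
          rcases h2 with h2 | h2
          · exact hpq h2
          · exact h1 ⟨h2, h3⟩)]

lemma foldA_get (ms : List String) : ∀ (da : List Int) (k : Int),
    da.length = 52 →
    (∀ m ∈ ms, ∀ c ∈ m.toList, pvDomChar c = true ∧ pvOkChar c = true) →
    (∀ s : Int, 0 ≤ s → s < 52 → PySem.List.pyGetD da s 0 ≤ k) →
    ((PySem.List.enumerate ms k).foldl (fun da im => pvStepA da im.1 im.2.toList) da).length = 52 ∧
    ∀ s : Int, 0 ≤ s → s < 52 →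
      PySem.List.pyGetD
        ((PySem.List.enumerate ms k).foldl (fun da im => pvStepA da im.1 im.2.toList) da)
        s 0 =
      if PySem.List.pyGetD da s 0 = k then k + pvRun s ms
      else PySem.List.pyGetD da s 0 := by
  induction ms with
  | nil =>
    intro da k hlen _ _
    exact ⟨by simpa [PySem.List.enumerate_nil] using hlen,
           by intro s hs1 hs2; simp [PySem.List.enumerate_nil, pvRun]⟩
  | cons m ms ih =>
    intro da k hlen hall hle
    rw [PySem.List.enumerate_cons]
    simp only [List.foldl_cons]
    obtain ⟨hlen1, hget1⟩ := stepA_get m.toList da k hlen (fun c hc => hall m (by simp) c hc)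
    have hle1 : ∀ s : Int, 0 ≤ s → s < 52 →
        PySem.List.pyGetD (pvStepA da k m.toList) s 0 ≤ k + 1 := by
      intro s h1 h2
      rw [hget1 s h1 h2]
      have := hle s h1 h2
      split_ifs <;> omega
    obtain ⟨hlen2, hget2⟩ :=
      ih (pvStepA da k m.toList) (k + 1) hlen1 (fun x hx => hall x (by simp [hx])) hle1
    refine ⟨hlen2, ?_⟩
    intro s hs1 hs2
    rw [hget2 s hs1 hs2, hget1 s hs1 hs2]
    have hda := hle s hs1 hs2
    by_cases hk : PySem.List.pyGetD da s 0 = k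
    · by_cases hm : s ∈ m.toList.map pvSlotC
      · rw [if_pos (show s ∈ List.map pvSlotC m.toList ∧
              PySem.List.pyGetD da s 0 = k from ⟨hm, hk⟩), if_pos hk]
        simp [pvRun, hm] <;> omega
      · rw [if_neg (show ¬ (s ∈ List.map pvSlotC m.toList ∧
              PySem.List.pyGetD da s 0 = k) from fun h => hm h.1),
            if_neg (show ¬ PySem.List.pyGetD da s 0 = k + 1 by omega), if_pos hk]
        simp [pvRun, hm] <;> omega
    · rw [if_neg (show ¬ (s ∈ List.map pvSlotC m.toList ∧
              PySem.List.pyGetD da s 0 = k) from fun h => hk h.2),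
          if_neg (show ¬ PySem.List.pyGetD da s 0 = k + 1 by omega), if_neg hk]

lemma run_le (s : Int) (ms : List String) : pvRun s ms ≤ ms.length := by
  induction ms with
  | nil => simp [pvRun]
  | cons m ms ih => simp only [pvRun]; split_ifs <;> simp <;> omega

lemma run_eq_len (s : Int) (ms : List String) :
    pvRun s ms = ms.length ↔ ∀ m ∈ ms, s ∈ m.toList.map pvSlotC := by
  induction ms with
  | nil => simp [pvRun]
  | cons m ms ih =>
    simp only [pvRun, List.length_cons, List.mem_cons]
    split_ifs with h
    · constructor
      · intro he x hx
        rcases hx with rfl | hx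
        · exact h
        · exact (ih.mp (by push_cast at he ⊢; omega)) x hx
      · intro hx
        have := ih.mpr (fun x hx' => hx x (Or.inr hx'))
        push_cast
        omega
    · constructor
      · intro he; have := run_le s ms; exfalso; push_cast at he; omega
      · intro hx; exact absurd (hx m (Or.inl rfl)) h

lemma foldB_some (ms : List String) : ∀ (S0 : PySem.Set Int),
    ∃ S, (ms.foldl (fun common member =>
        some (match common with
              | none => PySem.Set.ofList (member.toList.map pvPriB)
              | some c => PySem.Set.inter c (PySem.Set.ofList (member.toList.map pvPriB))))
        (some S0)) = some S ∧
      ∀ p : Int, p ∈ S ↔ p ∈ S0 ∧ ∀ m ∈ ms, p ∈ m.toList.map pvPriB := by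
  induction ms with
  | nil => intro S0; exact ⟨S0, rfl, by simp⟩
  | cons m ms ih =>
    intro S0
    obtain ⟨S, hS, hmem⟩ := ih (PySem.Set.inter S0 (PySem.Set.ofList (m.toList.map pvPriB)))
    refine ⟨S, by simpa using hS, ?_⟩
    intro p
    rw [hmem p, PySem.Set.mem_inter, PySem.Set.mem_ofList]
    constructor
    · rintro ⟨⟨h1, h2⟩, h3⟩
      refine ⟨h1, ?_⟩
      intro x hx
      rcases List.mem_cons.mp hx with h | h
      · rw [h]; exact h2
      · exact h3 x h
    · rintro ⟨h1, h2⟩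
      exact ⟨⟨h1, h2 m List.mem_cons_self⟩, fun x hx => h2 x (List.mem_cons_of_mem m hx)⟩

lemma scan_eq (n1 : Int) (da : List Int) (S? : Option (PySem.Set Int)) :
    ∀ chars : List Char,
      (∀ c ∈ chars, (PySem.List.pyGetD da (findPriority c - 1) 0 = n1 ↔
        (match S? with | none => True | some s => pvPriB c ∈ s))) →
      pvScanA da n1 chars = pvScanB S? chars := by
  intro chars
  induction chars with
  | nil => intro _; rfl
  | cons c rest ih =>
    intro hpred
    have hiff := hpred c (by simp)
    simp only [pvScanA, pvScanB]
    cases S? with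
    | none =>
      simp only [] at hiff
      rw [if_pos (hiff.mpr trivial)]
      simp [pvPriB_eq]
    | some s =>
      simp only [] at hiff
      by_cases hin : pvPriB c ∈ s
      · have hct : PySem.Set.contains s (pvPriB c) = true :=
          (PySem.Set.contains_iff s (pvPriB c)).mpr hin
        rw [if_pos (hiff.mpr hin)]
        simp [hct, pvPriB_eq]
        intro h
        exact absurd (pvPriB_eq c ▸ hin) h
      · have hcf : PySem.Set.contains s (pvPriB c) = false := by
          cases hb : PySem.Set.contains s (pvPriB c)
          · rfl
          · exact absurd ((PySem.Set.contains_iff s (pvPriB c)).mp hb) hin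
        rw [if_neg (fun h => hin (hiff.mp h)), ih (fun x hx => hpred x (by simp [hx]))]
        simp [hcf]
        intro h
        exact absurd h hin

lemma getD_replicate (s : Int) (hs1 : 0 ≤ s) (hs2 : s < 52) :
    PySem.List.pyGetD (List.replicate 52 (0 : Int)) s 0 = 0 := by
  rw [PySem.List.pyGetD_eq_getElem _ _ (by omega) (by simp; omega), List.getElem_replicate]

lemma mem_pvChars (group : List String) (m : String) (hm : m ∈ group) (c : Char)
    (hc : c ∈ m.toList) : c ∈ pvChars group := by
  unfold pvChars
  exact List.mem_flatMap.mpr ⟨m, hm, hc⟩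

-- ===== VERDICT (by name: the statement is the Claim_ definition above) =====
theorem findSharedItemInNGroup_spec : Claim_equal_findSharedItemInNGroup := by
  intro group hdom hpre
  obtain ⟨hne, hokb, hnab⟩ := hpre
  have hok : ∀ s ∈ group, ∀ c ∈ s.toList, pvOkChar c = true := by
    rw [List.all_eq_true] at hokb
    intro s hs c hc
    have := hokb s hs
    rw [List.all_eq_true] at this
    exact this c hc
  have H : ∀ c ∈ pvChars group, 1 ≤ pvPri c ∨
      ¬ ∃ c' ∈ pvChars group, pvPri c' = pvPri c + 52 := by
    rw [List.all_eq_true] at hnab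
    intro c hcm
    rcases Bool.or_eq_true_iff.mp (hnab c hcm) with h | h
    · left; simpa using h
    · right
      rw [Bool.not_eq_eq_eq_not, Bool.not_true, List.any_eq_false] at h
      rintro ⟨c', hc', he⟩
      exact absurd (by simpa using he) (h c' hc')
  have hNA : ∀ c1 ∈ pvChars group, ∀ c2 ∈ pvChars group,
      pvSlotC c1 = pvSlotC c2 → pvPri c1 = pvPri c2 := by
    intro c1 h1 c2 h2 hs
    unfold pvSlotC at hs
    by_cases a1 : pvPri c1 - 1 < 0 <;> by_cases a2 : pvPri c2 - 1 < 0 <;>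
      simp only [a1, a2, if_pos, if_neg, if_true, if_false] at hs
    · omega
    · rcases H c1 h1 with h | h
      · omega
      · exact absurd ⟨c2, h2, by omega⟩ h
    · rcases H c2 h2 with h | h
      · omega
      · exact absurd ⟨c1, h1, by omega⟩ h
    · omega
  unfold Spec_findSharedItemInNGroup findSharedItemInNGroup findSharedItemInNGroup_alt
  have hdom' : ∀ m ∈ group, ∀ c ∈ m.toList, pvDomChar c = true := by
    intro m hm c hc
    unfold Dom_findSharedItemInNGroup at hdom
    rw [List.all_eq_true] at hdom
    have := hdom m hm
    simp only [pvDomStr, List.all_eq_true] at this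
    exact this c hc
  have hboth : ∀ m ∈ group, ∀ c ∈ m.toList, pvDomChar c = true ∧ pvOkChar c = true :=
    fun m hm c hc => ⟨hdom' m hm c hc, hok m hm c hc⟩
  simp only [PySem.List.slice_to_neg_one]
  have hlast : PySem.List.pyGetD group (-1) "" = group.getLast hne :=
    PySem.List.pyGetD_neg_one group "" hne
  have hlastmem : group.getLast hne ∈ group := List.getLast_mem hne
  have hmsmem : ∀ m ∈ group.dropLast, m ∈ group := fun m hm => List.mem_of_mem_dropLast hm
  set ms := group.dropLast with hms
  have hmslen : (ms.length : Int) = (group.length : Int) - 1 := by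
    rw [hms, List.length_dropLast]
    have : 1 ≤ group.length := List.length_pos_iff.mpr hne
    omega
  obtain ⟨hdalen, hda⟩ := foldA_get ms (List.replicate 52 0) 0 (by simp)
      (fun m hm => hboth m (hmsmem m hm))
      (fun s h1 h2 => by rw [getD_replicate s h1 h2])
  have hdaget : ∀ s : Int, 0 ≤ s → s < 52 →
      PySem.List.pyGetD
        ((PySem.List.enumerate ms 0).foldl (fun da im => pvStepA da im.1 im.2.toList)
          (List.replicate 52 0)) s 0 = pvRun s ms := by
    intro s h1 h2
    rw [hda s h1 h2, getD_replicate s h1 h2]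
    simp
  -- membership transfer on alias-free groups: slot presence ↔ priority presence
  have hslotpri : ∀ c ∈ pvChars group, ∀ m ∈ group,
      (pvSlotC c ∈ m.toList.map pvSlotC ↔ findPriority c ∈ m.toList.map findPriority) := by
    intro c hc m hm
    constructor
    · intro h
      obtain ⟨c', hc', he⟩ := List.mem_map.mp h
      have := hNA c' (mem_pvChars group m hm c' hc') c hc he
      exact List.mem_map.mpr ⟨c', hc', by rw [← pvPri_eq, ← pvPri_eq, this]⟩
    · intro h
      obtain ⟨c', hc', he⟩ := List.mem_map.mp h
      exact List.mem_map.mpr ⟨c', hc',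
        pvSlotC_congr c' c (by rw [pvPri_eq, pvPri_eq, he])⟩
  cases hcase : ms with
  | nil =>
    have hg1 : (group.length : Int) - 1 = 0 := by rw [← hmslen, hcase]; simp
    simp only [PySem.List.enumerate_nil, List.foldl_nil]
    rw [hg1, hlast]
    exact scan_eq 0 (List.replicate 52 0) none (group.getLast hne).toList
      (fun c hc => by
        obtain ⟨b1, b2, _, _⟩ := slot_bounds c (hboth _ hlastmem c hc).1 (hboth _ hlastmem c hc).2
        rw [read_slot _ (by simp) c (hboth _ hlastmem c hc).1 (hboth _ hlastmem c hc).2,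
            getD_replicate _ b1 b2]
        simp)
  | cons m0 ms' =>
    rw [hcase] at hdaget hmslen hdalen
    obtain ⟨S, hS, hmem⟩ := foldB_some ms' (PySem.Set.ofList (m0.toList.map pvPriB))
    have hfoldB : (m0 :: ms').foldl (fun common member =>
        some (match common with
              | none => PySem.Set.ofList (member.toList.map pvPriB)
              | some c => PySem.Set.inter c (PySem.Set.ofList (member.toList.map pvPriB))))
        none = some S := by
      simpa using hS
    have hmemS : ∀ p : Int, p ∈ S ↔ ∀ m ∈ m0 :: ms', p ∈ m.toList.map findPriority := by
      intro p
      rw [hmem p]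
      simp only [List.mem_cons, PySem.Set.mem_ofList, pvPriB_eq]
      constructor
      · rintro ⟨hh1, hh2⟩ x hx
        rcases hx with rfl | hx
        · simpa [pvPriB_eq] using hh1
        · simpa [pvPriB_eq] using hh2 x hx
      · intro h
        exact ⟨by simpa [pvPriB_eq] using h m0 (Or.inl rfl),
               fun x hx => by simpa [pvPriB_eq] using h x (Or.inr hx)⟩
    rw [hfoldB, hlast]
    refine scan_eq ((group.length : Int) - 1) _ (some S) _ ?_
    intro c hc
    have hcb := hboth _ hlastmem c hc
    obtain ⟨b1, b2, _, _⟩ := slot_bounds c hcb.1 hcb.2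
    have hcg : c ∈ pvChars group := mem_pvChars group _ hlastmem c hc
    rw [read_slot _ hdalen c hcb.1 hcb.2, hdaget _ b1 b2]
    simp only [pvPriB_eq, hmemS (findPriority c)]
    constructor
    · intro h m hm
      have hrun := (run_eq_len (pvSlotC c) (m0 :: ms')).mp (by omega)
      exact (hslotpri c hcg m (hmsmem m (by rw [hcase]; exact hm))).mp (hrun m hm)
    · intro h
      have : ∀ m ∈ m0 :: ms', pvSlotC c ∈ m.toList.map pvSlotC := by
        intro m hm
        exact (hslotpri c hcg m (hmsmem m (by rw [hcase]; exact hm))).mpr (h m hm)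
      have := (run_eq_len (pvSlotC c) (m0 :: ms')).mpr this
      omega
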